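-- pv_equiv track=rewrite | github.com/afkbot-io/afkbotio | afkbot/services/setup/policy_inputs.py | is_valid_dns_host
-- ===== SOURCE A (Python) =====
-- def is_valid_dns_host(value: str) -> bool:
--     """Return whether value looks like a valid DNS host label sequence."""
--
--     if len(value) > 253:
--         return False
--     labels = value.split(".")
--     if not labels:
--         return False
--     for label in labels:
--         if not label or len(label) > 63:
--             return False
--         if not label[0].isalnum() or not label[-1].isalnum():
--             return False
--         if not all(char.isalnum() or char == "-" for char in label):
--             return False
--     return True
-- ===== SOURCE B (Python) =====
-- def is_valid_dns_host(value: str) -> bool: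
--     """Return whether value looks like a valid DNS host label sequence."""
--
--     if len(value) > 253:
--         return False
--     n = 0               # length of the current label so far
--     last_alnum = False  # whether the previous char of the label is alphanumeric
--     for ch in value:
--         if ch == ".":
--             if n == 0 or not last_alnum:
--                 return False
--             n = 0
--             last_alnum = False
--         else:
--             if n == 0:
--                 if not ch.isalnum():
--                     return False
--             else:
--                 if not (ch.isalnum() or ch == "-"):
--                     return False
--             n += 1
--             if n > 63:
--                 return False
--             last_alnum = ch.isalnum()
--     return n > 0 and last_alnum
-- ===== Notes on version B (the rewrite author's own statement) =====
-- stated objective: alternative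
-- what changed: Replaced A's split-on-dot-then-per-label-loop (which materialises the label list and re-scans each label three times: bounds, first/last char, all-chars pass) by a single left-to-right scan of the string that tracks only the current label's length and whether the previous character is alphanumeric.
import Mathlib
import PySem

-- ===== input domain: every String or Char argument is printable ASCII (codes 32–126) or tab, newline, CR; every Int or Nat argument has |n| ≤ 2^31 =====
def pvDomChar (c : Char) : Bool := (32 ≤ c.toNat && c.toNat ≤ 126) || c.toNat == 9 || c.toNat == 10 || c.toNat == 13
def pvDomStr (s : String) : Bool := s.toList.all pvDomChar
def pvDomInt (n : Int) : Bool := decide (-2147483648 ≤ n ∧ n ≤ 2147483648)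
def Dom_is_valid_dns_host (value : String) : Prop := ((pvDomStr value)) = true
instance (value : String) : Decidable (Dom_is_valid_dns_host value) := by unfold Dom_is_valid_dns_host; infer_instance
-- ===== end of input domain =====

-- B replaces A's split(".")-then-per-label-loop by a single left-to-right scan that tracks the
-- current label's length and whether its previous char is alphanumeric (objective: alternative
-- single-pass decomposition; same return value on every input).

-- ===== PORT A =====
-- per-label body of A's for-loop (the two index accesses label[0] / label[-1] are only
-- reached when label is nonempty, so the `none` fallbacks below are unreachable)
def pvLabelOk (label : String) : Bool :=
  if label == "" || PySem.Str.len label > 63 then false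
  else
    match PySem.Str.pyGet? label 0, PySem.Str.pyGet? label (-1) with
    | some c0, some cl =>
        if !(PySem.Chars.isalnum c0) || !(PySem.Chars.isalnum cl) then false
        else label.toList.all (fun c => PySem.Chars.isalnum c || c == '-')
    | _, _ => false

def is_valid_dns_host (value : String) : Bool :=
  if PySem.Str.len value > 253 then false
  else
    match PySem.Str.split? value "." with
    | none => false            -- unreachable: the separator "." is nonempty
    | some labels =>
        if labels.isEmpty then false
        else labels.all pvLabelOk

-- ===== PORT B =====
-- the for-loop of Source B: n = current label length, la = previous char is alphanumeric
def pvScan : List Char → Nat → Bool → Bool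
  | [], n, la => decide (0 < n) && la
  | c :: rest, n, la =>
    if c == '.' then
      if n == 0 || !la then false else pvScan rest 0 false
    else
      if n == 0 then
        if !(PySem.Chars.isalnum c) then false
        else if n + 1 > 63 then false
        else pvScan rest (n + 1) (PySem.Chars.isalnum c)
      else
        if !(PySem.Chars.isalnum c || c == '-') then false
        else if n + 1 > 63 then false
        else pvScan rest (n + 1) (PySem.Chars.isalnum c)

def is_valid_dns_host_alt (value : String) : Bool :=
  if PySem.Str.len value > 253 then false
  else pvScan value.toList 0 false

-- ===== PRECONDITION & SPEC =====
def Spec_is_valid_dns_host (value : String) (out : Bool) : Prop := out = is_valid_dns_host_alt value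
instance (value : String) (out : Bool) : Decidable (Spec_is_valid_dns_host value out) := by unfold Spec_is_valid_dns_host; infer_instance

-- ===== CLAIM (what is proved, stated in full; the proofs are below) =====
def Claim_equal_is_valid_dns_host : Prop := ∀ (value : String), Dom_is_valid_dns_host value → Spec_is_valid_dns_host value (is_valid_dns_host value)

-- ===== LEMMAS AND PROOFS =====

-- proof-side vocabulary
def pvOkc (c : Char) : Bool := PySem.Chars.isalnum c || c == '-'
def pvHeadAl (l : List Char) : Bool := (l.head?.map PySem.Chars.isalnum).getD false
-- semantics of pvLabelOk on the char list
def pvGoodC (l : List Char) : Bool :=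
  !(l.isEmpty) && l.length ≤ 63 && pvHeadAl l
    && (l.getLast?.map PySem.Chars.isalnum).getD false && l.all pvOkc
-- split on '.' carrying the reversed current chunk
def pvSplitD : List Char → List Char → List (List Char)
  | [], cur => [cur.reverse]
  | c :: rest, cur => if c = '.' then cur.reverse :: pvSplitD rest [] else pvSplitD rest (c :: cur)

theorem pvSplitD_ne_nil (l cur : List Char) : pvSplitD l cur ≠ [] := by
  induction l generalizing cur with
  | nil => simp [pvSplitD]
  | cons c rest ih => by_cases h : c = '.' <;> simp [pvSplitD, h, ih]

theorem pvGo_spec (fuel : Nat) : ∀ (l cur : List Char) (acc : List (List Char)), l.length ≤ fuel →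
    PySem.Chars.splitOn.go ['.'] fuel l cur acc = acc.reverse ++ pvSplitD l cur := by
  induction fuel with
  | zero =>
    intro l cur acc h
    have : l = [] := by cases l <;> simp_all
    subst this
    simp [PySem.Chars.splitOn.go, pvSplitD]
  | succ fuel ih =>
    intro l cur acc h
    cases l with
    | nil => simp [PySem.Chars.splitOn.go, pvSplitD]
    | cons c rest =>
      by_cases hc : c = '.'
      · subst hc
        have hp : List.isPrefixOf ['.'] ('.' :: rest) = true := by simp [List.isPrefixOf]
        rw [show PySem.Chars.splitOn.go ['.'] (fuel+1) ('.' :: rest) cur acc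
              = PySem.Chars.splitOn.go ['.'] fuel rest [] (cur.reverse :: acc) by
            simp [PySem.Chars.splitOn.go, hp]]
        rw [ih rest [] (cur.reverse :: acc) (by simpa using h)]
        simp [pvSplitD]
      · have hp : List.isPrefixOf ['.'] (c :: rest) = false := by
          simp [List.isPrefixOf]; exact fun h' => absurd h'.symm hc
        rw [show PySem.Chars.splitOn.go ['.'] (fuel+1) (c :: rest) cur acc
              = PySem.Chars.splitOn.go ['.'] fuel rest (c :: cur) acc by
            simp [PySem.Chars.splitOn.go, hp]]
        rw [ih rest (c :: cur) acc (by simpa using h)]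
        simp [pvSplitD, hc]

theorem pvSplitOn_eq (cs : List Char) : PySem.Chars.splitOn cs ['.'] = pvSplitD cs [] := by
  have := pvGo_spec (cs.length + 1) cs [] [] (by omega)
  simpa [PySem.Chars.splitOn] using this

theorem pvLabelOk_mk (l : List Char) : pvLabelOk (String.ofList l) = pvGoodC l := by
  cases l with
  | nil => simp [pvLabelOk, pvGoodC]
  | cons c rest =>
    have hne : ((String.ofList (c :: rest)) == "") = false := by
      simp [String.ext_iff]
    have h0 : PySem.List.pyGet? (c :: rest) 0 = some c := by
      simp [PySem.List.pyGet?, PySem.List.pyIdx?]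
    have h1 : PySem.List.pyGet? (c :: rest) (-1) = some ((c :: rest).getLast (by simp)) := by
      simp [PySem.List.pyGet?, PySem.List.pyIdx?]
      simp [List.getLast_eq_getElem]
      rfl
    simp only [pvLabelOk, pvGoodC, hne, PySem.Str.len_eq, PySem.Str.pyGet?_eq,
      PySem.Chars.pyGet?_eq_listPyGet?, String.toList_ofList, h0, h1]
    by_cases hlen : (c :: rest).length > 63
    · have h63 : 63 ≤ rest.length := by simp at hlen; omega
      simp [h63, show ¬ rest.length < 63 by omega]
    · have hl : (c :: rest).getLast? = some ((c :: rest).getLast (by simp)) := by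
        simp [List.getLast?_eq_some_getLast]
      have h63 : ¬ (63 ≤ rest.length) := by simp at hlen; omega
      simp only [hl, Option.map_some, Option.getD_some, List.head?_cons, pvHeadAl]
      simp [h63, show rest.length < 63 by omega]
      by_cases ha : PySem.Chars.isalnum c
      · unfold pvOkc; simp [ha]
      · simp [ha]

theorem pvHeadAl_append_single (xs : List Char) (c : Char) :
    pvHeadAl (xs ++ [c]) = if xs = [] then PySem.Chars.isalnum c else pvHeadAl xs := by
  cases xs <;> simp [pvHeadAl]

theorem pvGoodC_rev (cur : List Char) (h : cur ≠ []) :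
    pvGoodC cur.reverse =
      (decide (cur.length ≤ 63) && pvHeadAl cur.reverse && pvHeadAl cur && cur.all pvOkc) := by
  cases cur with
  | nil => simp at h
  | cons a cs =>
    simp only [pvGoodC, List.all_reverse, List.getLast?_reverse, List.length_reverse,
      List.head?_cons, List.isEmpty_eq_false_iff, pvHeadAl, Option.map_some, Option.getD_some]
    have hne2 : ((cs.reverse ++ [a]).isEmpty) = false := by simp
    cases hb : pvHeadAl (a :: cs).reverse <;>
      cases hl : decide ((a :: cs).length ≤ 63) <;>
        simp_all [pvHeadAl] <;> (try tauto) <;>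
          (rw [show ((cs.reverse ++ [a]).isEmpty) = false from by simp]; simp)

theorem pvSplitD_bad : ∀ (l cur : List Char), cur ≠ [] →
    (pvHeadAl cur.reverse = false ∨ cur.all pvOkc = false ∨ 63 < cur.length) →
    (pvSplitD l cur).all pvGoodC = false := by
  intro l
  induction l with
  | nil =>
    intro cur hne hbad
    rcases hbad with h | h | h <;>
      simp [pvSplitD, pvGoodC_rev cur hne, h] <;> omega
  | cons c rest ih =>
    intro cur hne hbad
    by_cases hc : c = '.'
    · subst hc
      have hfirst : pvGoodC cur.reverse = false := by
        rcases hbad with h | h | h <;> simp [pvGoodC_rev cur hne, h] <;> omega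
      simp [pvSplitD, hfirst]
    · have : pvSplitD (c :: rest) cur = pvSplitD rest (c :: cur) := by simp [pvSplitD, hc]
      rw [this]
      apply ih (c :: cur) (by simp)
      rcases hbad with h | h | h
      · left
        rw [show (c :: cur).reverse = cur.reverse ++ [c] by simp, pvHeadAl_append_single,
          if_neg (by simpa using hne)]
        exact h
      · right; left; simp [h]
      · right; right; simp; omega

theorem pvGoodC_rev_ok (a : Char) (cs : List Char)
    (hall : (a :: cs).all pvOkc = true) (hlen : (a :: cs).length ≤ 63)
    (hrev : pvHeadAl ((a :: cs).reverse) = true) :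
    pvGoodC (cs.reverse ++ [a]) = PySem.Chars.isalnum a := by
  have h := pvGoodC_rev (a :: cs) (by simp)
  simp only [List.reverse_cons] at h hrev
  rw [h]
  simp only [List.all_cons] at hall
  simp [hall, pvHeadAl]
  intro _
  refine ⟨by simp at hlen; omega, ?_⟩
  simpa [pvHeadAl] using hrev

theorem pvScan_splitD : ∀ (l cur : List Char),
    cur.all pvOkc = true → cur.length ≤ 63 → (cur = [] ∨ pvHeadAl cur.reverse = true) →
    pvScan l cur.length (pvHeadAl cur) = (pvSplitD l cur).all pvGoodC := by
  intro l
  induction l with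
  | nil =>
    intro cur hall hlen hhd
    cases cur with
    | nil => simp [pvScan, pvSplitD, pvGoodC]
    | cons a cs =>
      have h := hhd.resolve_left (by simp)
      have key := pvGoodC_rev_ok a cs hall hlen h
      simp [pvScan, pvSplitD, key, pvHeadAl]
  | cons c rest ih =>
    intro cur hall hlen hhd
    by_cases hc : c = '.'
    · subst hc
      cases cur with
      | nil => simp [pvScan, pvSplitD, pvGoodC]
      | cons a cs =>
        have hrev := hhd.resolve_left (by simp)
        have hgr : pvGoodC (cs.reverse ++ [a]) = PySem.Chars.isalnum a :=
          pvGoodC_rev_ok a cs hall hlen hrev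
        by_cases hla : pvHeadAl (a :: cs) = true
        · have lhs : pvScan ('.' :: rest) (a :: cs).length (pvHeadAl (a :: cs))
              = pvScan rest 0 false := by
            simp [pvScan, hla]
          rw [lhs]
          have h0 := ih [] (by simp) (by simp) (Or.inl rfl)
          simp only [List.length_nil, pvHeadAl, Option.map_none, List.head?_nil,
            Option.getD_none] at h0
          rw [h0]
          have hla' : PySem.Chars.isalnum a = true := by simpa [pvHeadAl] using hla
          simp [pvSplitD, hgr, hla']
        · have hla' : pvHeadAl (a :: cs) = false := by simpa using hla
          have lhs : pvScan ('.' :: rest) (a :: cs).length (pvHeadAl (a :: cs)) = false := by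
            simp [pvScan, hla']
          rw [lhs]
          have hla'' : PySem.Chars.isalnum a = false := by simpa [pvHeadAl] using hla'
          simp [pvSplitD, hgr, hla'']
    · cases cur with
      | nil =>
        by_cases ha : PySem.Chars.isalnum c = true
        · have lhs : pvScan (c :: rest) 0 (pvHeadAl []) = pvScan rest 1 (PySem.Chars.isalnum c) := by
            simp [pvScan, pvHeadAl, hc, ha]
          rw [show ([] : List Char).length = 0 by rfl, lhs]
          have h1 := ih [c] (by simp [pvOkc, ha]) (by simp) (Or.inr (by simp [pvHeadAl, ha]))
          simp only [List.length_cons, List.length_nil, pvHeadAl, List.head?_cons,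
            Option.map_some, Option.getD_some] at h1
          rw [h1]
          simp [pvSplitD, hc]
        · have lhs : pvScan (c :: rest) 0 (pvHeadAl []) = false := by
            simp [pvScan, pvHeadAl, hc, ha]
          rw [show ([] : List Char).length = 0 by rfl, lhs]
          rw [show pvSplitD (c :: rest) [] = pvSplitD rest [c] by simp [pvSplitD, hc]]
          exact (pvSplitD_bad rest [c] (by simp) (Or.inl (by simp [pvHeadAl, ha]))).symm
      | cons a cs =>
        have hne' : ((a :: cs).length == 0) = false := by simp
        by_cases hoc : pvOkc c = true
        · have hoc' : (PySem.Chars.isalnum c || c == '-') = true := hoc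
          by_cases h63 : (a :: cs).length + 1 > 63
          · have lhs : pvScan (c :: rest) (a :: cs).length (pvHeadAl (a :: cs)) = false := by
              simp [pvScan, hc, hne', hoc', h63]
              intro h2
              exfalso
              simp at h63
              omega
            rw [lhs]
            rw [show pvSplitD (c :: rest) (a :: cs) = pvSplitD rest (c :: a :: cs) by
              simp [pvSplitD, hc]]
            exact (pvSplitD_bad rest (c :: a :: cs) (by simp)
              (Or.inr (Or.inr (by simp at h63 ⊢; omega)))).symm
          · have lhs : pvScan (c :: rest) (a :: cs).length (pvHeadAl (a :: cs))
                = pvScan rest ((a :: cs).length + 1) (PySem.Chars.isalnum c) := by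
              simp [pvScan, hc, hne', hoc', h63]
              intro _
              simp at h63
              omega
            rw [lhs]
            have hrev : pvHeadAl (c :: a :: cs).reverse = true := by
              have h := hhd.resolve_left (by simp)
              rw [show (c :: a :: cs).reverse = (a :: cs).reverse ++ [c] by simp,
                pvHeadAl_append_single, if_neg (by simp)]
              exact h
            have hall2 : (c :: a :: cs).all pvOkc = true := by
              simp only [List.all_cons] at hall ⊢
              simp [hoc] at *
              tauto
            have h1 := ih (c :: a :: cs) hall2
              (by simp at h63 ⊢; omega) (Or.inr hrev)
            simp only [List.length_cons, pvHeadAl, List.head?_cons,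
              Option.map_some, Option.getD_some] at h1
            simp only [List.length_cons]
            rw [h1]
            simp [pvSplitD, hc]
        · have hoc' : (PySem.Chars.isalnum c || c == '-') = false := by
            simpa [pvOkc] using hoc
          have lhs : pvScan (c :: rest) (a :: cs).length (pvHeadAl (a :: cs)) = false := by
            simp [pvScan, hc, hne', hoc']
          rw [lhs]
          rw [show pvSplitD (c :: rest) (a :: cs) = pvSplitD rest (c :: a :: cs) by
            simp [pvSplitD, hc]]
          exact (pvSplitD_bad rest (c :: a :: cs) (by simp)
            (Or.inr (Or.inl (by
              simp [pvOkc] at hoc ⊢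
              rintro (h | h) <;> simp_all)))).symm

-- ===== VERDICT (by name: the statement is the Claim_ definition above) =====
theorem is_valid_dns_host_spec : Claim_equal_is_valid_dns_host := by
  intro value _
  unfold Spec_is_valid_dns_host
  show is_valid_dns_host value = is_valid_dns_host_alt value
  unfold is_valid_dns_host is_valid_dns_host_alt
  by_cases hlen : PySem.Str.len value > 253
  · rw [if_pos hlen, if_pos hlen]
  · rw [if_neg hlen, if_neg hlen]
    have hsplit : PySem.Str.split? value "." =
        some ((pvSplitD value.toList []).map String.ofList) := by
      simp [PySem.Str.split?, PySem.Chars.split?, pvSplitOn_eq]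
    rw [hsplit]
    have hne : ((pvSplitD value.toList []).map String.ofList).isEmpty = false := by
      simp [List.isEmpty_iff, pvSplitD_ne_nil]
    simp only [hne, Bool.false_eq_true, if_false, List.all_map]
    have h1 : (pvLabelOk ∘ String.ofList) = pvGoodC := funext pvLabelOk_mk
    rw [h1]
    have := pvScan_splitD value.toList [] (by simp) (by simp) (Or.inl rfl)
    simpa [pvHeadAl] using this.symm
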